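-- pv_equiv track=rewrite | github.com/fernandoaafonseca/daily-coding | books/book-01-77-python-advanced-programming-exercises/003_sum_even_elements_fibonacci.py | even_numbers_fibonacci_sequence
-- ===== SOURCE A (Python) =====
-- def even_numbers_fibonacci_sequence(upper_bound: int) -> list[int]:
--     fibonacci_even_numbers = []
--     last_number = 0
--     current_number = 1
--
--     while current_number < upper_bound:
--         next_number = last_number + current_number
--
--         if next_number % 2 == 0 and next_number <= upper_bound:
--             fibonacci_even_numbers.append(next_number)
--
--         last_number = current_number
--         current_number = next_number
--
--
--     return fibonacci_even_numbers
-- ===== SOURCE B (Python) =====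
-- def even_numbers_fibonacci_sequence(upper_bound: int) -> list[int]:
--     # Generate only even Fibonacci numbers via E_k = 4*E_{k-1} + E_{k-2} (2, 8, 34, ...)
--     result = []
--     a, b = 2, 8
--     while a <= upper_bound:
--         result.append(a)
--         a, b = b, 4 * b + a
--     return result
-- ===== Notes on version B (the rewrite author's own statement) =====
-- stated objective: simpler
-- what changed: B generates only the even Fibonacci numbers directly with the recurrence E_k = 4*E_{k-1} + E_{k-2} starting from 2, 8, instead of enumerating every Fibonacci number and filtering by parity.
import Mathlib
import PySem

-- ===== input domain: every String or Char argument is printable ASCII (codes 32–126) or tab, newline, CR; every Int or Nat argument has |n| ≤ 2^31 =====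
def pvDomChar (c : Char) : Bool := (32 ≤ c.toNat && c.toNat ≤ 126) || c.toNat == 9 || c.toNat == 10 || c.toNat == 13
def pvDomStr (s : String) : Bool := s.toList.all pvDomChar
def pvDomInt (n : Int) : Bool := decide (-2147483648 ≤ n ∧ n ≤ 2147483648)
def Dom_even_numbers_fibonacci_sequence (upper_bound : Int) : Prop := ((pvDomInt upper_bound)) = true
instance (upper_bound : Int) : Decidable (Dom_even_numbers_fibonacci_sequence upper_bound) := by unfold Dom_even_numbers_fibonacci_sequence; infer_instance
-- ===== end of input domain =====

-- B replaces A's generate-all-Fibonacci-and-filter-by-parity loop with a direct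
-- generator of only the even Fibonacci numbers via E_k = 4*E_{k-1} + E_{k-2} (objective: simpler).

-- ===== PORT A =====
-- A's while loop as structural recursion over the same state (last, current, acc);
-- the invariant argument `h` only justifies termination.
def pvLoopA (ub last cur : Int) (acc : List Int)
    (h : 0 ≤ last ∧ last ≤ cur ∧ 1 ≤ cur) : List Int :=
  -- next_number := last + cur (inlined)
  if hc : cur < ub then
    pvLoopA ub cur (last + cur)
      (if PySem.Int.mod (last + cur) 2 = 0 ∧ last + cur ≤ ub then acc ++ [last + cur] else acc)
      (by refine ⟨by omega, by omega, by omega⟩)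
  else
    acc
termination_by ((ub - last).toNat + (ub - cur).toNat)
decreasing_by
  obtain ⟨_h1, h2, h3⟩ := h
  omega

def even_numbers_fibonacci_sequence (upper_bound : Int) : List Int :=
  pvLoopA upper_bound 0 1 [] (by norm_num)

-- ===== PORT B =====
-- Source B's while loop; state (a, b) with b = 4*a + previous even Fibonacci number.
def pvLoopB (ub a b : Int) (h : 0 < a ∧ a < b) : List Int :=
  if ha : a ≤ ub then
    a :: pvLoopB ub b (4 * b + a) (by omega)
  else
    []
termination_by ((ub + 1 - a).toNat + (ub + 1 - b).toNat)
decreasing_by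
  obtain ⟨h1, h2⟩ := h
  omega

def even_numbers_fibonacci_sequence_alt (upper_bound : Int) : List Int :=
  pvLoopB upper_bound 2 8 (by norm_num)

-- ===== PRECONDITION & SPEC =====
def Spec_even_numbers_fibonacci_sequence (upper_bound : Int) (out : List Int) : Prop := out = even_numbers_fibonacci_sequence_alt upper_bound
instance (upper_bound : Int) (out : List Int) : Decidable (Spec_even_numbers_fibonacci_sequence upper_bound out) := by unfold Spec_even_numbers_fibonacci_sequence; infer_instance

-- ===== CLAIM (what is proved, stated in full; the proofs are below) =====
def Claim_equal_even_numbers_fibonacci_sequence : Prop := ∀ (upper_bound : Int), Dom_even_numbers_fibonacci_sequence upper_bound → Spec_even_numbers_fibonacci_sequence upper_bound (even_numbers_fibonacci_sequence upper_bound)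

-- ===== LEMMAS AND PROOFS =====

-- Python `% 2` coincides with Lean's emod for the positive divisor 2.
theorem pv_mod_two (n : Int) : PySem.Int.mod n 2 = n % 2 :=
  PySem.Int.mod_eq_emod_of_pos (by norm_num)

-- the loops only depend on the numeric state, not on the invariant proofs
theorem pvLoopA_congr (ub last cur last' cur' : Int) (acc acc' : List Int)
    (h : 0 ≤ last ∧ last ≤ cur ∧ 1 ≤ cur) (h' : 0 ≤ last' ∧ last' ≤ cur' ∧ 1 ≤ cur')
    (e1 : last = last') (e2 : cur = cur') (e3 : acc = acc') :
    pvLoopA ub last cur acc h = pvLoopA ub last' cur' acc' h' := by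
  subst e1; subst e2; subst e3; rfl

theorem pvLoopB_congr (ub a b a' b' : Int)
    (h : 0 < a ∧ a < b) (h' : 0 < a' ∧ a' < b')
    (e1 : a = a') (e2 : b = b') :
    pvLoopB ub a b h = pvLoopB ub a' b' h' := by
  subst e1; subst e2; rfl

-- Key simulation lemma: from a state (a, b) of A's loop with a odd, b even,
-- 0 < a < b (b is the even Fibonacci value just handled), A's remaining run
-- equals acc followed by B's loop started at the next even value 2a+3b
-- (paired with the even value after it, 8a+13b).
theorem pv_key (ub : Int) (n : Nat) :
    ∀ (a b : Int) (acc : List Int) (hA : 0 ≤ a ∧ a ≤ b ∧ 1 ≤ b)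
      (hB : 0 < 2 * a + 3 * b ∧ 2 * a + 3 * b < 8 * a + 13 * b),
      (ub - b).toNat ≤ n → 1 ≤ a → a % 2 = 1 → b % 2 = 0 → a < b →
      pvLoopA ub a b acc hA = acc ++ pvLoopB ub (2 * a + 3 * b) (8 * a + 13 * b) hB := by
  induction n with
  | zero =>
    intro a b acc hA hB hn ha hpa hpb hab
    -- measure 0 forces b ≥ ub, so both loops stop immediately
    rw [pvLoopA, pvLoopB, dif_neg (by omega), dif_neg (by omega)]
    simp
  | succ n ih =>
    intro a b acc hA hB hn ha hpa hpb hab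
    rw [pvLoopA]
    by_cases h1 : b < ub
    · rw [dif_pos h1]
      -- next = a + b is odd: no append
      rw [if_neg (by rw [pv_mod_two]; omega)]
      rw [pvLoopA]
      by_cases h2 : a + b < ub
      · rw [dif_pos h2]
        -- next = b + (a + b) = a + 2b is odd: no append
        rw [if_neg (by rw [pv_mod_two]; omega)]
        rw [pvLoopA]
        by_cases h3 : b + (a + b) < ub
        · rw [dif_pos h3]
          -- next = 2a + 3b is even: appended iff ≤ ub
          by_cases h4 : 2 * a + 3 * b ≤ ub
          · conv_rhs => rw [pvLoopB]
            rw [dif_pos h4]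
            rw [if_pos ⟨by rw [pv_mod_two]; omega, by omega⟩]
            rw [pvLoopA_congr ub (b + (a + b)) (a + b + (b + (a + b)))
                  (a + 2 * b) (2 * a + 3 * b) _ (acc ++ [2 * a + 3 * b])
                  _ ⟨by omega, by omega, by omega⟩
                  (by ring) (by ring) (by ring_nf)]
            rw [ih (a + 2 * b) (2 * a + 3 * b) (acc ++ [2 * a + 3 * b])
                  _ ⟨by omega, by omega⟩ (by omega) (by omega) (by omega) (by omega) (by omega)]
            rw [pvLoopB_congr ub (2 * (a + 2 * b) + 3 * (2 * a + 3 * b))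
                  (8 * (a + 2 * b) + 13 * (2 * a + 3 * b))
                  (8 * a + 13 * b) (4 * (8 * a + 13 * b) + (2 * a + 3 * b))
                  _ (by constructor <;> omega) (by ring) (by ring)]
            simp
          · rw [if_neg (by omega)]
            rw [pvLoopA, dif_neg (by omega), pvLoopB, dif_neg (by omega)]
            simp
        · rw [dif_neg h3, pvLoopB, dif_neg (by omega)]
          simp
      · rw [dif_neg h2, pvLoopB, dif_neg (by omega)]
        simp
    · rw [dif_neg h1, pvLoopB, dif_neg (by omega)]
      simp

-- ===== VERDICT (by name: the statement is the Claim_ definition above) =====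
theorem even_numbers_fibonacci_sequence_spec : Claim_equal_even_numbers_fibonacci_sequence := by
  intro ub _
  show even_numbers_fibonacci_sequence ub = even_numbers_fibonacci_sequence_alt ub
  unfold even_numbers_fibonacci_sequence even_numbers_fibonacci_sequence_alt
  by_cases h : 1 < ub
  · -- first two iterations of A: (0,1) → (1,1) → (1,2), appending 2 (since 2 ≤ ub)
    rw [pvLoopA, dif_pos (by omega)]
    rw [if_neg (by rw [pv_mod_two]; omega)]
    rw [pvLoopA, dif_pos (by omega)]
    rw [if_pos ⟨by rw [pv_mod_two]; omega, by omega⟩]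
    rw [pvLoopA_congr ub (0 + 1) (1 + (0 + 1)) 1 2 _ [2]
          _ (by norm_num) (by norm_num) (by norm_num) (by norm_num)]
    rw [pv_key ub (ub - 2).toNat 1 2 [2]
          ⟨by norm_num, by norm_num, by norm_num⟩ (by norm_num) (by omega)
          (by norm_num) (by norm_num) (by norm_num) (by norm_num)]
    rw [pvLoopB_congr ub (2 * 1 + 3 * 2) (8 * 1 + 13 * 2) 8 34
          _ (by norm_num) (by norm_num) (by norm_num)]
    conv_rhs => rw [pvLoopB]
    rw [dif_pos (by omega)]
    rw [pvLoopB_congr ub 8 34 8 (4 * 8 + 2)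
          _ (by norm_num) (by norm_num) (by norm_num)]
    simp
  · -- ub ≤ 1: both loops stop at once
    rw [pvLoopA, dif_neg (by omega), pvLoopB, dif_neg (by omega)]
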